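-- pv_equiv track=rewrite | github.com/sidjain516/GBM-Classification | 2020_June_cancer_XGB_imp_feature.py | possiblePermutations
-- ===== SOURCE A (Python) =====
-- def possiblePermutations(establishedOrder, newCancers):
--     if not newCancers:
--         return [establishedOrder]
--     result = []
--     for pperm in possiblePermutations(establishedOrder, newCancers[1:]):
--         for splitIndex in range(len(pperm) + 1):
--             result.append(pperm[:splitIndex] + [newCancers[0]] + pperm[splitIndex:])
--     return result
-- ===== SOURCE B (Python) =====
-- def possiblePermutations(establishedOrder, newCancers):
--     result = [establishedOrder]
--     for c in reversed(newCancers):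
--         result = [p[:i] + [c] + p[i:]
--                   for p in result
--                   for i in range(len(p) + 1)]
--     return result
-- ===== Notes on version B (the rewrite author's own statement) =====
-- stated objective: simpler
-- what changed: Replaced the recursion on newCancers by a single iterative accumulating loop over reversed(newCancers) that rebuilds the permutation list with a comprehension; no call stack, same output order.
import Mathlib
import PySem

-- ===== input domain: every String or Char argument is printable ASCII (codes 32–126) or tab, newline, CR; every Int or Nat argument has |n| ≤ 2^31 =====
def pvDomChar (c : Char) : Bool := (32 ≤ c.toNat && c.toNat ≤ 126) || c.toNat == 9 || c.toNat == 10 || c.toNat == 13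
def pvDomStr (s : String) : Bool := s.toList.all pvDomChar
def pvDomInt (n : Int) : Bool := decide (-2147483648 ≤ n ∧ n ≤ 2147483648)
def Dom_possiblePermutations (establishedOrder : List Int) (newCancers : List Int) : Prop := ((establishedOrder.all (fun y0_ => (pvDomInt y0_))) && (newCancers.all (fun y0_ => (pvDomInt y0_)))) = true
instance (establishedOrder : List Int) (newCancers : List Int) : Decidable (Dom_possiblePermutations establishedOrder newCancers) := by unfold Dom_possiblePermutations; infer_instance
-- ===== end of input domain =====

-- B replaces A's recursion by one iterative accumulating loop over reversed(newCancers) (simpler decomposition, same output order).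

-- ===== PORT A =====
-- recursion on newCancers; inner loops transliterated as foldl over the permutation
-- list and over range(len(pperm)+1), slices via PySem.List.slice (exact).
def possiblePermutations (establishedOrder : List Int) (newCancers : List Int) : List (List Int) :=
  match newCancers with
  | [] => [establishedOrder]
  | c :: rest =>
    (possiblePermutations establishedOrder rest).foldl
      (fun result pperm =>
        (PySem.List.pyRange 0 ((pperm.length : Int) + 1) 1).foldl
          (fun r splitIndex =>
            r ++ [PySem.List.slice pperm none (some splitIndex) ++ [c] ++
                  PySem.List.slice pperm (some splitIndex) none])
          result)
      []

-- ===== PORT B =====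
-- the comprehension [p[:i]+[c]+p[i:] for p in result for i in range(len(p)+1)];
-- take/drop are exact for the nonnegative indices range produces.
def pvInsertAll (c : Int) (p : List Int) : List (List Int) :=
  (List.range (p.length + 1)).map (fun i => p.take i ++ [c] ++ p.drop i)

def possiblePermutations_alt (establishedOrder : List Int) (newCancers : List Int) : List (List Int) :=
  newCancers.reverse.foldl (fun result c => result.flatMap (pvInsertAll c)) [establishedOrder]

-- ===== PRECONDITION & SPEC =====
def Spec_possiblePermutations (establishedOrder : List Int) (newCancers : List Int) (out : List (List Int)) : Prop := out = possiblePermutations_alt establishedOrder newCancers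
instance (establishedOrder : List Int) (newCancers : List Int) (out : List (List Int)) : Decidable (Spec_possiblePermutations establishedOrder newCancers out) := by unfold Spec_possiblePermutations; infer_instance

-- ===== CLAIM (what is proved, stated in full; the proofs are below) =====
def Claim_equal_possiblePermutations : Prop := ∀ (establishedOrder : List Int) (newCancers : List Int), Dom_possiblePermutations establishedOrder newCancers → Spec_possiblePermutations establishedOrder newCancers (possiblePermutations establishedOrder newCancers)

-- ===== LEMMAS AND PROOFS =====

-- A's inner loop over range(len(pperm)+1) is exactly pvInsertAll appended to the accumulator.
theorem pvInner_eq (c : Int) (p : List Int) (acc : List (List Int)) :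
    (PySem.List.pyRange 0 ((p.length : Int) + 1) 1).foldl
      (fun r splitIndex =>
        r ++ [PySem.List.slice p none (some splitIndex) ++ [c] ++
              PySem.List.slice p (some splitIndex) none]) acc
    = acc ++ pvInsertAll c p := by
  rw [PySem.List.pyRange_one]
  have h1 : ((p.length : Int) + 1 - 0).toNat = p.length + 1 := by omega
  rw [h1, List.foldl_map, PySem.List.foldl_append_singleton_eq_map]
  unfold pvInsertAll
  congr 1
  apply List.map_congr_left
  intro k _
  rw [zero_add, PySem.List.slice_to_natCast, PySem.List.slice_from_natCast]

-- A's outer loop is flatMap of pvInsertAll over the recursive result.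
theorem pvA_cons (eo : List Int) (c : Int) (rest : List Int) :
    possiblePermutations eo (c :: rest)
    = (possiblePermutations eo rest).flatMap (pvInsertAll c) := by
  show (possiblePermutations eo rest).foldl _ [] = _
  have hfun : (fun (result : List (List Int)) (pperm : List Int) =>
      (PySem.List.pyRange 0 ((pperm.length : Int) + 1) 1).foldl
        (fun r splitIndex =>
          r ++ [PySem.List.slice pperm none (some splitIndex) ++ [c] ++
                PySem.List.slice pperm (some splitIndex) none]) result)
      = fun result pperm => result ++ pvInsertAll c pperm := by
    funext result pperm; exact pvInner_eq c pperm result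
  rw [hfun, PySem.List.foldl_append_eq_flatMap, List.nil_append]

theorem pvAB_eq (eo : List Int) (nc : List Int) :
    possiblePermutations eo nc = possiblePermutations_alt eo nc := by
  induction nc with
  | nil => rfl
  | cons c rest ih =>
    rw [pvA_cons, ih]
    unfold possiblePermutations_alt
    rw [List.reverse_cons, List.foldl_append]
    rfl

-- ===== VERDICT (by name: the statement is the Claim_ definition above) =====
theorem possiblePermutations_spec : Claim_equal_possiblePermutations := by
  intro eo nc _
  unfold Spec_possiblePermutations
  exact pvAB_eq eo nc
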